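-- pv_equiv track=rewrite | github.com/mahrens917/ci_shared | ci_tools/scripts/import_checking.py | check_parent_imported
-- ===== SOURCE A (Python) =====
-- from typing import Set
--
-- def has_specific_child_imports(parent: str, module_name: str, all_imports: Set[str]) -> bool:
--     """Check if parent has specific child imports that exclude this module."""
--     return any(imp.startswith(parent + ".") and imp != module_name for imp in all_imports)
--
-- def check_parent_imported(module_name: str, all_imports: Set[str]) -> bool:
--     """Check if a parent module is imported wholesale."""
--     module_parts = module_name.split(".")
--     for i in range(len(module_parts) - 1):
--         parent = ".".join(module_parts[: i + 1])
--         if parent in all_imports or f"src.{parent}" in all_imports: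
--             if not has_specific_child_imports(parent, module_name, all_imports):
--                 return True
--     return False
-- ===== SOURCE B (Python) =====
-- def check_parent_imported(module_name, all_imports):
--     """Check if a parent module is imported wholesale."""
--     # Index pass over the imports: collect every dotted ancestor prefix of any
--     # import other than module_name itself; P is in this set exactly when some
--     # other import starts with P + ".".
--     parents_with_children = set()
--     for imp in all_imports:
--         if imp != module_name:
--             for k, ch in enumerate(imp):
--                 if ch == '.':
--                     parents_with_children.add(imp[:k])
--     parts = module_name.split(".")
--     parent = None
--     for part in parts[:-1]:
--         parent = part if parent is None else parent + "." + part
--         if ((parent in all_imports or "src." + parent in all_imports)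
--                 and parent not in parents_with_children):
--             return True
--     return False
-- ===== Notes on version B (the rewrite author's own statement) =====
-- stated objective: alternative
-- what changed: Instead of re-scanning all imports for child imports at every candidate parent, B builds in one pass a set of every dotted ancestor prefix of every other import and then decides each candidate parent (built incrementally, not by repeated join) with O(1) set lookups; it trades A's repeated inner scans for an up-front index over all imports.
import Mathlib
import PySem

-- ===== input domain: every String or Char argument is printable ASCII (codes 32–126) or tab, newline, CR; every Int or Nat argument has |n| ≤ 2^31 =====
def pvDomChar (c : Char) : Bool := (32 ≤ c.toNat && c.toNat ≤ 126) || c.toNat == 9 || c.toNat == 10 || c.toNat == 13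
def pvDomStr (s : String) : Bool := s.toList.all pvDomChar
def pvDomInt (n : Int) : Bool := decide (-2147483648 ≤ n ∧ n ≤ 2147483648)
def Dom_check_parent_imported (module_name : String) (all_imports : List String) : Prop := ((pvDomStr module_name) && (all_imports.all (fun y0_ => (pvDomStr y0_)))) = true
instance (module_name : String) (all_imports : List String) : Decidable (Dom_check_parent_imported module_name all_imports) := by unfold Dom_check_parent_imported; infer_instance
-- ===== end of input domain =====

-- B replaces A's per-parent rescan of all imports by one pass that indexes every
-- dotted ancestor prefix of the other imports in a set (objective: alternative
-- algorithm of similar cost; the index is built up front, lookups are then cheap).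
-- all_imports is a Python set → List String of distinct elements; membership only is used.

-- ===== PORT A =====
-- 'parent in all_imports' (parent held as List Char, the set holds Strings);
-- both Pythons contain this very test, so both ports use it
def pvMemA (parent : List Char) (all_imports : List String) : Bool :=
  all_imports.any (fun imp => imp.toList == parent)

-- any(imp.startswith(parent + ".") and imp != module_name for imp in all_imports)
def has_specific_child_imports (parent : List Char) (module_name : String) (all_imports : List String) : Bool :=
  all_imports.any (fun imp => PySem.Chars.startswith imp.toList (parent ++ ['.']) && imp != module_name)

-- the 'for i in range(len(module_parts) - 1)' loop, over the remaining index list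
def pvALoop (module_name : String) (all_imports : List String) (parts : List (List Char)) : List Nat → Bool
  | [] => false
  | i :: rest =>
      let parent := PySem.Chars.join ['.'] (parts.take (i + 1))
      if pvMemA parent all_imports || pvMemA ('s' :: 'r' :: 'c' :: '.' :: parent) all_imports then
        if !has_specific_child_imports parent module_name all_imports then true
        else pvALoop module_name all_imports parts rest
      else pvALoop module_name all_imports parts rest

def check_parent_imported (module_name : String) (all_imports : List String) : Bool :=
  let module_parts := PySem.Chars.splitOn module_name.toList ['.']
  pvALoop module_name all_imports module_parts (List.range (module_parts.length - 1))

-- ===== PORT B =====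
-- the inner 'for k, ch in enumerate(imp): if ch == '.': add(imp[:k])' loop:
-- list of the prefixes added, in order (pref = chars already passed)
def pvDotPrefixesAux (pref : List Char) : List Char → List (List Char)
  | [] => []
  | c :: rest =>
      if c = '.' then pref :: pvDotPrefixesAux (pref ++ [c]) rest
      else pvDotPrefixesAux (pref ++ [c]) rest

def pvDotPrefixes (cs : List Char) : List (List Char) := pvDotPrefixesAux [] cs

-- the outer building loop over all_imports
def pvParentsWithChildren (module_name : String) (all_imports : List String) : PySem.Set (List Char) :=
  all_imports.foldl
    (fun s imp => if imp == module_name then s else PySem.Set.update s (pvDotPrefixes imp.toList))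
    PySem.Set.empty

-- 'for part in parts[:-1]' with the incrementally built parent (none = first iteration)
def pvBLoop (module_name : String) (all_imports : List String) (pwc : PySem.Set (List Char)) :
    List (List Char) → Option (List Char) → Bool
  | [], _ => false
  | part :: rest, acc =>
      let parent := match acc with
        | none => part
        | some p => p ++ '.' :: part
      if (pvMemA parent all_imports || pvMemA ('s' :: 'r' :: 'c' :: '.' :: parent) all_imports)
          && !(PySem.Set.contains pwc parent) then true
      else pvBLoop module_name all_imports pwc rest (some parent)

def check_parent_imported_alt (module_name : String) (all_imports : List String) : Bool :=
  let pwc := pvParentsWithChildren module_name all_imports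
  let parts := PySem.Chars.splitOn module_name.toList ['.']
  pvBLoop module_name all_imports pwc parts.dropLast none

-- ===== PRECONDITION & SPEC =====
def Spec_check_parent_imported (module_name : String) (all_imports : List String) (out : Bool) : Prop := out = check_parent_imported_alt module_name all_imports
instance (module_name : String) (all_imports : List String) (out : Bool) : Decidable (Spec_check_parent_imported module_name all_imports out) := by unfold Spec_check_parent_imported; infer_instance

-- ===== CLAIM (what is proved, stated in full; the proofs are below) =====
def Claim_equal_check_parent_imported : Prop := ∀ (module_name : String) (all_imports : List String), Dom_check_parent_imported module_name all_imports → Spec_check_parent_imported module_name all_imports (check_parent_imported module_name all_imports)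

-- ===== LEMMAS AND PROOFS =====

theorem pv_if_or (b x : Bool) : (if b then true else x) = (b || x) := by
  cases b <;> simp

theorem pv_if_if_or (b c x : Bool) :
    (if b then (if c then true else x) else x) = (b && c || x) := by
  cases b <;> cases c <;> simp

-- membership in pvDotPrefixesAux: the collected prefixes are pref ++ (cut of rest at a dot)
theorem pv_mem_dotPrefixesAux (rest : List Char) : ∀ (pref p : List Char),
    p ∈ pvDotPrefixesAux pref rest ↔ ∃ q r, rest = q ++ '.' :: r ∧ p = pref ++ q := by
  induction rest with
  | nil =>
      intro pref p
      simp [pvDotPrefixesAux]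
  | cons c rest ih =>
      intro pref p
      by_cases hc : c = '.'
      · subst hc
        rw [show pvDotPrefixesAux pref ('.' :: rest) = pref :: pvDotPrefixesAux (pref ++ ['.']) rest
          from by simp [pvDotPrefixesAux]]
        simp only [List.mem_cons, ih]
        constructor
        · rintro (rfl | ⟨q, r, hqr, rfl⟩)
          · exact ⟨[], rest, rfl, by simp⟩
          · exact ⟨'.' :: q, r, by simp [hqr], by simp⟩
        · rintro ⟨q, r, hqr, rfl⟩
          cases q with
          | nil =>
              left
              have : rest = r := by injection hqr
              simp
          | cons c' q' =>
              right
              have h1 : '.' = c' := by injection hqr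
              have h2 : rest = q' ++ '.' :: r := by injection hqr
              exact ⟨q', r, h2, by simp [← h1]⟩
      · rw [show pvDotPrefixesAux pref (c :: rest) = pvDotPrefixesAux (pref ++ [c]) rest
          from by simp [pvDotPrefixesAux, hc]]
        rw [ih]
        constructor
        · rintro ⟨q, r, hqr, rfl⟩
          exact ⟨c :: q, r, by simp [hqr], by simp⟩
        · rintro ⟨q, r, hqr, rfl⟩
          cases q with
          | nil =>
              exfalso
              have h1 : c = '.' := by injection hqr
              exact hc h1
          | cons c' q' =>
              have h1 : c = c' := by injection hqr
              have h2 : rest = q' ++ '.' :: r := by injection hqr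
              exact ⟨q', r, h2, by simp [h1]⟩

theorem pv_mem_dotPrefixes (cs p : List Char) :
    p ∈ pvDotPrefixes cs ↔ PySem.Chars.startswith cs (p ++ ['.']) = true := by
  rw [PySem.Chars.startswith_iff]
  unfold pvDotPrefixes
  rw [pv_mem_dotPrefixesAux]
  constructor
  · rintro ⟨q, r, rfl, hp⟩
    simp at hp
    exact ⟨r, by simp [hp]⟩
  · rintro ⟨r, hr⟩
    exact ⟨p, r, by simp [← hr], rfl⟩

theorem pv_mem_parentsWithChildren (module_name : String) (all_imports : List String) (p : List Char) :
    p ∈ pvParentsWithChildren module_name all_imports ↔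
      ∃ imp ∈ all_imports, imp ≠ module_name ∧ PySem.Chars.startswith imp.toList (p ++ ['.']) = true := by
  unfold pvParentsWithChildren
  have main : ∀ (l : List String) (s : PySem.Set (List Char)),
      p ∈ l.foldl (fun s imp => if imp == module_name then s
            else PySem.Set.update s (pvDotPrefixes imp.toList)) s ↔
        p ∈ s ∨ ∃ imp ∈ l, imp ≠ module_name ∧
          PySem.Chars.startswith imp.toList (p ++ ['.']) = true := by
    intro l
    induction l with
    | nil => intro s; simp
    | cons imp l ih =>
        intro s
        by_cases h : imp = module_name
        · rw [List.foldl_cons, if_pos (show (imp == module_name) = true by simp [h]), ih]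
          constructor
          · rintro (hs | ⟨i, hi, hne, hsw⟩)
            · exact Or.inl hs
            · exact Or.inr ⟨i, List.mem_cons_of_mem _ hi, hne, hsw⟩
          · rintro (hs | ⟨i, hi, hne, hsw⟩)
            · exact Or.inl hs
            · rcases List.mem_cons.1 hi with rfl | hi
              · exact absurd h hne
              · exact Or.inr ⟨i, hi, hne, hsw⟩
        · rw [List.foldl_cons, if_neg (show ¬ (imp == module_name) = true by simp [h]), ih,
            PySem.Set.mem_update]
          constructor
          · rintro ((hs | hp) | ⟨i, hi, hne, hsw⟩)
            · exact Or.inl hs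
            · exact Or.inr ⟨imp, List.mem_cons_self .., h, (pv_mem_dotPrefixes _ _).1 hp⟩
            · exact Or.inr ⟨i, List.mem_cons_of_mem _ hi, hne, hsw⟩
          · rintro (hs | ⟨i, hi, hne, hsw⟩)
            · exact Or.inl (Or.inl hs)
            · rcases List.mem_cons.1 hi with rfl | hi
              · exact Or.inl (Or.inr ((pv_mem_dotPrefixes _ _).2 hsw))
              · exact Or.inr ⟨i, hi, hne, hsw⟩
  rw [main]
  simp [PySem.Set.empty]

-- the child test agrees: A's rescan = membership in B's prefix index
theorem pv_child_eq (module_name : String) (all_imports : List String) (p : List Char) :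
    has_specific_child_imports p module_name all_imports =
      PySem.Set.contains (pvParentsWithChildren module_name all_imports) p := by
  rw [Bool.eq_iff_iff]
  unfold has_specific_child_imports
  rw [PySem.Set.contains_iff, pv_mem_parentsWithChildren, List.any_eq_true]
  constructor
  · rintro ⟨imp, hi, h⟩
    simp only [Bool.and_eq_true, bne_iff_ne] at h
    exact ⟨imp, hi, h.2, h.1⟩
  · rintro ⟨imp, hi, hne, hsw⟩
    exact ⟨imp, hi, by simp [hsw, hne]⟩

-- join over an appended last part (PySem.Chars.join = intercalate)
theorem pv_join_append_singleton (xs : List (List Char)) (x : List Char) (h : xs ≠ []) :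
    PySem.Chars.join ['.'] (xs ++ [x]) = PySem.Chars.join ['.'] xs ++ '.' :: x := by
  induction xs with
  | nil => exact absurd rfl h
  | cons a xs ih =>
      cases xs with
      | nil => simp [PySem.Chars.join_cons_cons, PySem.Chars.join_singleton]
      | cons b ys =>
          have h1 : (a :: b :: ys) ++ [x] = a :: b :: (ys ++ [x]) := by simp
          rw [h1, PySem.Chars.join_cons_cons, PySem.Chars.join_cons_cons]
          have h2 : PySem.Chars.join ['.'] (b :: (ys ++ [x]))
              = PySem.Chars.join ['.'] (b :: ys) ++ '.' :: x := by
            have h3 := ih (by simp)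
            simpa using h3
          rw [h2]
          simp

-- the successive parents B builds, as a list
def pvParents (acc : Option (List Char)) : List (List Char) → List (List Char)
  | [] => []
  | part :: rest =>
      let parent := match acc with
        | none => part
        | some p => p ++ '.' :: part
      parent :: pvParents (some parent) rest

theorem pv_BLoop_any (module_name : String) (all_imports : List String)
    (pwc : PySem.Set (List Char)) (l : List (List Char)) : ∀ (acc : Option (List Char)),
    pvBLoop module_name all_imports pwc l acc =
      (pvParents acc l).any (fun parent =>
        (pvMemA parent all_imports || pvMemA ('s' :: 'r' :: 'c' :: '.' :: parent) all_imports)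
          && !(PySem.Set.contains pwc parent)) := by
  induction l with
  | nil => intro acc; simp [pvBLoop, pvParents]
  | cons part rest ih =>
      intro acc
      simp only [pvBLoop, pvParents, List.any_cons, pv_if_or, ih]

theorem pv_ALoop_any (module_name : String) (all_imports : List String)
    (parts : List (List Char)) (is : List Nat) :
    pvALoop module_name all_imports parts is =
      is.any (fun i =>
        let parent := PySem.Chars.join ['.'] (parts.take (i + 1))
        (pvMemA parent all_imports || pvMemA ('s' :: 'r' :: 'c' :: '.' :: parent) all_imports)
          && !(has_specific_child_imports parent module_name all_imports)) := by
  induction is with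
  | nil => simp [pvALoop]
  | cons i rest ih =>
      simp only [pvALoop, List.any_cons, pv_if_if_or, ih]

-- B's successive parents are the joins of the growing prefix lists
theorem pv_parents_some (rest : List (List Char)) : ∀ (done : List (List Char)), done ≠ [] →
    pvParents (some (PySem.Chars.join ['.'] done)) rest =
      (List.range rest.length).map
        (fun k => PySem.Chars.join ['.'] (done ++ rest.take (k + 1))) := by
  induction rest with
  | nil => intro done _; simp [pvParents]
  | cons part rest ih =>
      intro done hd
      simp only [pvParents]
      have hstep : PySem.Chars.join ['.'] done ++ '.' :: part
          = PySem.Chars.join ['.'] (done ++ [part]) := (pv_join_append_singleton done part hd).symm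
      rw [hstep, ih (done ++ [part]) (by simp), List.length_cons, List.range_succ_eq_map]
      simp only [List.map_cons, List.map_map]
      rw [List.cons.injEq]
      refine ⟨by simp, ?_⟩
      apply List.map_congr_left
      intro k _
      simp [Function.comp, List.take_succ_cons, List.append_assoc]

theorem pv_parents_none (t : List (List Char)) :
    pvParents none t =
      (List.range t.length).map (fun k => PySem.Chars.join ['.'] (t.take (k + 1))) := by
  cases t with
  | nil => simp [pvParents]
  | cons p rest =>
      simp only [pvParents]
      have h1 : p = PySem.Chars.join ['.'] [p] := (PySem.Chars.join_singleton ['.'] p).symm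
      rw [List.length_cons, List.range_succ_eq_map]
      simp only [List.map_cons, List.map_map]
      rw [List.cons.injEq]
      refine ⟨by simp, ?_⟩
      rw [h1, pv_parents_some rest [p] (by simp)]
      apply List.map_congr_left
      intro k _
      simp [Function.comp, List.take_succ_cons]

theorem pv_any_range_congr (n : Nat) (f g : Nat → Bool) (h : ∀ i < n, f i = g i) :
    (List.range n).any f = (List.range n).any g := by
  rw [Bool.eq_iff_iff, List.any_eq_true, List.any_eq_true]
  constructor <;> rintro ⟨i, hi, hfi⟩ <;>
    exact ⟨i, hi, by rw [← hfi, h i (List.mem_range.1 hi)]⟩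

-- ===== VERDICT (by name: the statement is the Claim_ definition above) =====
theorem check_parent_imported_spec : Claim_equal_check_parent_imported := by
  intro module_name all_imports _
  unfold Spec_check_parent_imported check_parent_imported check_parent_imported_alt
  set parts := PySem.Chars.splitOn module_name.toList ['.'] with hparts
  rw [pv_ALoop_any, pv_BLoop_any, pv_parents_none, List.any_map]
  rw [List.dropLast_eq_take]
  have hlen : (parts.take (parts.length - 1)).length = parts.length - 1 := by
    rw [List.length_take]
    omega
  rw [hlen]
  refine pv_any_range_congr _ _ _ ?_
  intro i hi
  have htake : (parts.take (parts.length - 1)).take (i + 1) = parts.take (i + 1) := by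
    rw [List.take_take]
    congr 1
    omega
  simp only [Function.comp, htake, pv_child_eq]
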